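-- pv_equiv track=rewrite | github.com/Xin-Guan-HolisticAI/AlignmentBiasCheckingTools | alignbiascheck/benchmark_building.py | construct_non_containing_set
-- ===== SOURCE A (Python) =====
-- def construct_non_containing_set(strings):
--     def update_string_set(string_set, new_string):
--         # Convert the new string to lowercase for comparison
--         new_string_lower = new_string.lower()
--
--         # Create a list of strings to remove
--         strings_to_remove = [existing_string for existing_string in string_set if
--                              new_string_lower in existing_string.lower()]
--
--         # Remove all strings that contain the new string
--         for string_to_remove in strings_to_remove:
--             string_set.remove(string_to_remove)
--
--         # Check if the new string should be added
--         should_add = True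
--         for existing_string in string_set:
--             if existing_string.lower() in new_string_lower:
--                 should_add = False
--                 break
--
--         if should_add:
--             string_set.add(new_string)
--
--     result_set = set()
--     for string in strings:
--         update_string_set(result_set, string)
--     return result_set
-- ===== SOURCE B (Python) =====
-- def construct_non_containing_set(strings):
--     # Phase 1: last-occurrence table keyed by lowercase.
--     last = {}
--     for s in strings:
--         k = s.lower()
--         last.pop(k, None)   # drop any earlier occurrence so the key moves to the end
--         last[k] = s
--     # Phase 2: shortest-first, a key survives iff no surviving (hence minimal) key
--     # is a substring of it; any contained key has a minimal key inside it.
--     minimal = []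
--     for k in sorted(last, key=len):
--         if not any(u in k for u in minimal):
--             minimal.append(k)
--     keep = set(minimal)
--     return {v for k, v in last.items() if k in keep}
-- ===== Notes on version B (the rewrite author's own statement) =====
-- stated objective: faster
-- what changed: Replaces A's incremental set maintenance (remove containing strings / skip contained ones at each insertion) by two independent passes: build a last-occurrence table keyed by lowercase, then scan the keys shortest-first, keeping a key iff no already-kept (hence minimal) key is a substring of it.
import Mathlib
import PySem

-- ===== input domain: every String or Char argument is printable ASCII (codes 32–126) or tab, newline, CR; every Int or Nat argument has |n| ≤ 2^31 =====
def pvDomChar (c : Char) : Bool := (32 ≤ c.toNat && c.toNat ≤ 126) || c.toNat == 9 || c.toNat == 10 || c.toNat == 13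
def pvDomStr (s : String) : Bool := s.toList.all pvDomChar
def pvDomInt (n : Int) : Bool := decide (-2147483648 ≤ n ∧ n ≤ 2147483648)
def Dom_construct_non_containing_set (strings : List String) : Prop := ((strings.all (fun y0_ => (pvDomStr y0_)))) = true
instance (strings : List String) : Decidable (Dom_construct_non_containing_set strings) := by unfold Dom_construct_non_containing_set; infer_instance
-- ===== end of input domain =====

-- B replaces A's incremental remove/skip set maintenance by two independent passes — a
-- last-occurrence table keyed by lowercase, then a shortest-first scan keeping keys with no
-- kept key as substring (measured faster in a timing run; both return a set).

-- ===== PORT A =====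
def pvUpdateStringSet (string_set : PySem.Set String) (new_string : String) : PySem.Set String :=
  let new_string_lower := PySem.Str.lower new_string
  let strings_to_remove := string_set.filter
      (fun existing_string => PySem.Str.isIn new_string_lower (PySem.Str.lower existing_string))
  -- set.remove: every removed element was drawn from string_set itself, so it is present
  -- and remove coincides with discard (PySem.Set.remove?_of_mem)
  let string_set := strings_to_remove.foldl (fun st r => PySem.Set.discard st r) string_set
  let should_add := !(string_set.any (fun existing_string =>
      PySem.Str.isIn (PySem.Str.lower existing_string) new_string_lower))
  if should_add then PySem.Set.add string_set new_string else string_set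

def construct_non_containing_set (strings : List String) : List String :=
  strings.foldl (fun result_set string => pvUpdateStringSet result_set string) PySem.Set.empty

-- ===== PORT B =====
def construct_non_containing_set_alt (strings : List String) : List String :=
  -- last.pop(k, None); last[k] = s  ==  erase-then-insert (key moves to the end)
  let last := strings.foldl (fun d s =>
      let k := PySem.Str.lower s
      (d.erase k).insert k s) PySem.Dict.empty
  let minimal := (PySem.List.sorted last.keys (fun k => PySem.Str.len k)).foldl
      (fun m k => if m.any (fun u => PySem.Str.isIn u k) then m else m ++ [k]) []
  let keep := PySem.Set.ofList minimal
  last.items.foldl (fun acc p =>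
      if keep.contains p.1 then PySem.Set.add acc p.2 else acc) PySem.Set.empty

-- ===== PRECONDITION & SPEC =====
def Spec_construct_non_containing_set (strings : List String) (out : List String) : Prop := out = construct_non_containing_set_alt strings
instance (strings : List String) (out : List String) : Decidable (Spec_construct_non_containing_set strings out) := by unfold Spec_construct_non_containing_set; infer_instance

-- ===== CLAIM (what is proved, stated in full; the proofs are below) =====
def Claim_equal_construct_non_containing_set : Prop := ∀ (strings : List String), Dom_construct_non_containing_set strings → Spec_construct_non_containing_set strings (construct_non_containing_set strings)

-- ===== LEMMAS AND PROOFS =====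

-- x is minimal w.r.t. case-insensitive-key substring containment among the keys K
def pvMin (K : List String) (x : String) : Bool :=
  K.all (fun u => u == x || !PySem.Str.isIn u x)

def pvStep (d : PySem.Dict String String) (s : String) : PySem.Dict String String :=
  (d.erase (PySem.Str.lower s)).insert (PySem.Str.lower s) s

def pvSetOf (d : PySem.Dict String String) : List String :=
  (d.items.filter (fun p => pvMin d.keys p.1)).map (fun p => p.2)

def pvInv (d : PySem.Dict String String) : Prop :=
  d.keys.Nodup ∧ ∀ q ∈ d.items, q.1 = PySem.Str.lower q.2

lemma pvIsIn_refl (a : String) : PySem.Str.isIn a a = true := by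
  rw [PySem.Str.isIn_iff_infix]

lemma pvIsIn_trans {a b c : String} (h1 : PySem.Str.isIn a b = true)
    (h2 : PySem.Str.isIn b c = true) : PySem.Str.isIn a c = true := by
  rw [PySem.Str.isIn_iff_infix] at *
  exact h1.trans h2

lemma pvIsIn_antisymm {a b : String} (h1 : PySem.Str.isIn a b = true)
    (h2 : PySem.Str.isIn b a = true) : a = b := by
  rw [PySem.Str.isIn_iff_infix] at *
  exact String.toList_inj.mp (List.infix_antisymm h1 h2)

lemma pvIsIn_length_lt {a b : String} (h1 : PySem.Str.isIn a b = true) (h2 : a ≠ b) :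
    a.toList.length < b.toList.length := by
  rw [PySem.Str.isIn_iff_infix] at h1
  have hs := h1.sublist
  rcases lt_or_eq_of_le hs.length_le with h | h
  · exact h
  · exact absurd (String.toList_inj.mp (hs.eq_of_length h)) h2

lemma pvExists_min (K : List String) (k : String) :
    ∀ (n : Nat) (u : String), u.toList.length ≤ n → u ∈ K → PySem.Str.isIn u k = true → u ≠ k →
    ∃ w ∈ K, PySem.Str.isIn w k = true ∧ w ≠ k ∧ ∀ v ∈ K, v ≠ w → PySem.Str.isIn v w = false := by
  intro n
  induction n with
  | zero =>
    intro u hlen hu hin hne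
    refine ⟨u, hu, hin, hne, ?_⟩
    intro v hv hvne
    by_contra hc
    have hc' : PySem.Str.isIn v u = true := by
      cases h : PySem.Str.isIn v u with
      | false => exact absurd h hc
      | true => rfl
    have := pvIsIn_length_lt hc' hvne
    omega
  | succ n ih =>
    intro u hlen hu hin hne
    by_cases hmin : ∀ v ∈ K, v ≠ u → PySem.Str.isIn v u = false
    · exact ⟨u, hu, hin, hne, hmin⟩
    · push Not at hmin
      obtain ⟨v, hv, hvne, hvin⟩ := hmin
      have hvin' : PySem.Str.isIn v u = true := by
        cases h : PySem.Str.isIn v u with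
        | false => exact absurd h hvin
        | true => rfl
      have hlt := pvIsIn_length_lt hvin' hvne
      have hvk : PySem.Str.isIn v k = true := pvIsIn_trans hvin' hin
      have hvnek : v ≠ k := by
        intro h; subst h
        exact hne (pvIsIn_antisymm hin hvin')
      exact ih v (by omega) hv hvk hvnek

lemma pvItems_step (d : PySem.Dict String String) (s : String) :
    (pvStep d s).items =
      d.items.filter (fun p => !(p.1 == PySem.Str.lower s)) ++ [(PySem.Str.lower s, s)] := by
  unfold pvStep
  simp [PySem.Dict.insert, PySem.Dict.erase, PySem.Dict.contains, List.any_filter]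

lemma pvKeys_step (d : PySem.Dict String String) (s : String) :
    (pvStep d s).keys =
      d.keys.filter (fun u => !(u == PySem.Str.lower s)) ++ [PySem.Str.lower s] := by
  simp only [PySem.Dict.keys, pvItems_step, List.map_append, List.map_cons, List.map_nil,
    List.filter_map]
  rfl

lemma pvInv_empty : pvInv (PySem.Dict.empty : PySem.Dict String String) := by
  constructor
  · simp [PySem.Dict.keys, PySem.Dict.empty]
  · simp [PySem.Dict.empty]

lemma pvInv_step (d : PySem.Dict String String) (s : String) (h : pvInv d) : pvInv (pvStep d s) := by
  constructor
  · rw [pvKeys_step]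
    simp only [List.nodup_append]
    refine ⟨h.1.filter _, List.nodup_singleton _, ?_⟩
    simp [List.mem_filter]
  · rw [pvItems_step]
    intro q hq
    rcases List.mem_append.mp hq with h1 | h1
    · exact h.2 q (List.mem_of_mem_filter h1)
    · simp only [List.mem_singleton] at h1; subst h1; rfl

lemma pvFoldl_discard (R S : List String) :
    R.foldl (fun st r => PySem.Set.discard st r) S = S.filter (fun e => decide (e ∉ R)) := by
  induction R generalizing S with
  | nil => simp
  | cons r R ih =>
    rw [List.foldl_cons, ih]
    show List.filter _ (PySem.Set.discard S r) = _
    simp only [PySem.Set.discard, List.filter_filter]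
    apply List.filter_congr
    intro x hx
    by_cases h1 : x = r <;> by_cases h2 : x ∈ R <;> simp [h1, h2]

lemma pvVals_nodup (d : PySem.Dict String String) (h : pvInv d) (pr : String × String → Bool) :
    ((d.items.filter pr).map (fun q => q.2)).Nodup := by
  have h1 : (d.items.map (fun q => q.2)).Nodup := by
    have h2 : d.items.map (fun q => q.1) = d.items.map (fun q => PySem.Str.lower q.2) :=
      List.map_eq_map_iff.mpr h.2
    have h3 : (d.items.map (fun q => PySem.Str.lower q.2)).Nodup := by
      rw [← h2]; exact h.1
    rw [show (fun (q : String × String) => PySem.Str.lower q.2) =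
        PySem.Str.lower ∘ (fun q => q.2) from rfl, ← List.map_map] at h3
    exact List.Nodup.of_map _ h3
  exact h1.sublist (List.Sublist.map _ List.filter_sublist)

lemma pvMin_shift (K : List String) (k x : String) :
    (pvMin K x && !PySem.Str.isIn k x) =
      (!(x == k) && pvMin (K.filter (fun u => !(u == k)) ++ [k]) x) := by
  by_cases hxk : x = k
  · subst hxk
    simp only [pvIsIn_refl, Bool.not_true, Bool.and_false, beq_self_eq_true, Bool.false_and]
  · have hx : (x == k) = false := by simp [hxk]
    simp only [hx, Bool.not_false, Bool.true_and]
    refine Bool.eq_iff_iff.mpr ?_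
    simp only [Bool.and_eq_true, pvMin, List.all_eq_true, List.mem_append, List.mem_filter,
      List.mem_singleton, Bool.or_eq_true, beq_iff_eq, Bool.not_eq_eq_eq_not]
    constructor
    · rintro ⟨hall, hkx⟩
      intro u hu
      rcases hu with ⟨hu1, _⟩ | rfl
      · exact hall u hu1
      · right; exact hkx
    · intro hall
      have hkx : PySem.Str.isIn k x = false := by
        rcases hall k (Or.inr rfl) with h | h
        · exact absurd h.symm hxk
        · exact h
      refine ⟨?_, hkx⟩
      intro u hu
      by_cases huk : u = k
      · subst huk; right; exact hkx
      · exact hall u (Or.inl ⟨hu, by simp [huk]⟩)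

lemma pvMin_append_k (K : List String) (k : String) :
    pvMin (K.filter (fun u => !(u == k)) ++ [k]) k = true ↔
      ∀ u ∈ K, u ≠ k → PySem.Str.isIn u k = false := by
  simp only [pvMin, List.all_eq_true, List.mem_append, List.mem_filter, List.mem_singleton,
    Bool.or_eq_true, beq_iff_eq, Bool.not_eq_eq_eq_not]
  constructor
  · intro hall u hu hune
    rcases hall u (Or.inl ⟨hu, by simp [hune]⟩) with h | h
    · exact absurd h hune
    · exact h
  · intro hall u hu
    rcases hu with ⟨hu1, hu2⟩ | rfl
    · right; exact hall u hu1 (by simpa using hu2)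
    · left; rfl

def pvMinP (K : List String) (x : String) : Prop :=
  ∀ u ∈ K, u ≠ x → PySem.Str.isIn u x = false

lemma pvMin_iff (K : List String) (x : String) : pvMin K x = true ↔ pvMinP K x := by
  simp only [pvMin, List.all_eq_true, Bool.or_eq_true, beq_iff_eq, Bool.not_eq_eq_eq_not,
    Bool.not_true, pvMinP]
  constructor
  · intro h u hu hne
    rcases h u hu with h1 | h1
    · exact absurd h1 hne
    · exact h1
  · intro h u hu
    by_cases hux : u = x
    · exact Or.inl hux
    · exact Or.inr (h u hu hux)

lemma pvFold_min (K : List String) (hnd : K.Nodup) :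
    ∀ (pre l : List String),
      PySem.List.sorted K (fun k => PySem.Str.len k) = pre ++ l →
      ∀ x, (x ∈ pre.foldl
          (fun m k => if m.any (fun u => PySem.Str.isIn u k) then m else m ++ [k])
          ([] : List String))
        ↔ (x ∈ pre ∧ pvMinP K x) := by
  intro pre
  induction pre using List.reverseRecOn with
  | nil => intro l hord x; simp
  | append_singleton pre k ih =>
    intro l hord x
    rw [List.foldl_append]
    simp only [List.foldl_cons, List.foldl_nil]
    have hord' : PySem.List.sorted K (fun k => PySem.Str.len k) = pre ++ (k :: l) := by
      rw [hord, List.append_assoc, List.singleton_append]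
    have ih' := ih (k :: l) hord'
    have hperm := PySem.List.sorted_perm K (fun k => PySem.Str.len k) false
    have hordnd : (pre ++ [k] ++ l).Nodup := by
      rw [← hord]; exact hperm.nodup_iff.mpr hnd
    have hknotpre : k ∉ pre := by
      have h2 := (List.nodup_append.mp hordnd).1
      have h3 := List.nodup_append.mp h2
      intro hc
      exact h3.2.2 k hc k (List.mem_singleton_self k) rfl
    have hmemK : ∀ y, y ∈ pre ++ [k] ++ l → y ∈ K := by
      intro y hy
      exact hperm.mem_iff.mp (by rw [hord]; exact hy)
    have hlk : ∀ b ∈ l, PySem.Str.len k ≤ PySem.Str.len b := by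
      have hpw := PySem.List.sorted_pairwise K (fun k => PySem.Str.len k)
      rw [hord'] at hpw
      exact (List.pairwise_cons.mp (List.pairwise_append.mp hpw).2.1).1
    by_cases hMin : pvMinP K k
    · have hany : (pre.foldl
          (fun m k => if m.any (fun u => PySem.Str.isIn u k) then m else m ++ [k])
          ([] : List String)).any (fun u => PySem.Str.isIn u k) = false := by
        rw [List.any_eq_false]
        intro u hu
        have h3 := (ih' u).mp hu
        have huK : u ∈ K := hmemK u (List.mem_append_left _ (List.mem_append_left _ h3.1))
        have hune : u ≠ k := fun hh => hknotpre (hh ▸ h3.1)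
        simp only [Bool.not_eq_true]
        exact hMin u huK hune
      rw [hany, if_neg Bool.false_ne_true]
      constructor
      · intro hx
        rcases List.mem_append.mp hx with h1 | h1
        · have h2 := (ih' x).mp h1
          exact ⟨List.mem_append_left _ h2.1, h2.2⟩
        · rw [List.mem_singleton] at h1
          subst h1
          exact ⟨List.mem_append_right _ (List.mem_singleton_self _), hMin⟩
      · rintro ⟨hx1, hx2⟩
        rcases List.mem_append.mp hx1 with h1 | h1
        · exact List.mem_append_left _ ((ih' x).mpr ⟨h1, hx2⟩)
        · exact List.mem_append_right _ h1
    · have hex : ∃ u ∈ K, u ≠ k ∧ PySem.Str.isIn u k = true := by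
        unfold pvMinP at hMin
        push Not at hMin
        obtain ⟨u, hu, hune, hin⟩ := hMin
        exact ⟨u, hu, hune, by simpa using hin⟩
      obtain ⟨u, hu, hune, huin⟩ := hex
      obtain ⟨w, hwK, hwk, hwne, hwmin⟩ :=
        pvExists_min K k u.toList.length u le_rfl hu huin hune
      have hwlen := pvIsIn_length_lt hwk hwne
      have hword : w ∈ pre ++ [k] ++ l := by
        rw [← hord]; exact hperm.mem_iff.mpr hwK
      have hwpre : w ∈ pre := by
        rcases List.mem_append.mp hword with h1 | h1
        · rcases List.mem_append.mp h1 with h2 | h2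
          · exact h2
          · rw [List.mem_singleton] at h2
            exact absurd h2 hwne
        · exfalso
          have h4 := hlk w h1
          simp only [PySem.Str.len] at h4
          omega
      have hwfold := (ih' w).mpr ⟨hwpre, hwmin⟩
      have hany : (pre.foldl
          (fun m k => if m.any (fun u => PySem.Str.isIn u k) then m else m ++ [k])
          ([] : List String)).any (fun u => PySem.Str.isIn u k) = true :=
        List.any_eq_true.mpr ⟨w, hwfold, hwk⟩
      rw [hany, if_pos rfl]
      rw [ih' x]
      constructor
      · rintro ⟨h1, h2⟩
        exact ⟨List.mem_append_left _ h1, h2⟩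
      · rintro ⟨h1, h2⟩
        rcases List.mem_append.mp h1 with h3 | h3
        · exact ⟨h3, h2⟩
        · rw [List.mem_singleton] at h3
          subst h3
          exact absurd h2 hMin

lemma pvMinimal_mem (K : List String) (hnd : K.Nodup) (x : String) :
    (x ∈ (PySem.List.sorted K (fun k => PySem.Str.len k)).foldl
        (fun m k => if m.any (fun u => PySem.Str.isIn u k) then m else m ++ [k])
        ([] : List String))
      ↔ (x ∈ K ∧ pvMinP K x) := by
  rw [pvFold_min K hnd (PySem.List.sorted K (fun k => PySem.Str.len k)) [] (List.append_nil _).symm x]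
  rw [PySem.List.mem_sorted]

lemma pvStep_lemma (d : PySem.Dict String String) (s : String) (h : pvInv d) :
    pvUpdateStringSet (pvSetOf d) s = pvSetOf (pvStep d s) := by
  obtain ⟨hnd, hlow⟩ := h
  have e0 : pvUpdateStringSet (pvSetOf d) s =
      (fun st : PySem.Set String =>
        if !(st.any (fun e => PySem.Str.isIn (PySem.Str.lower e) (PySem.Str.lower s)))
        then PySem.Set.add st s else st)
      (((pvSetOf d).filter
          (fun e => PySem.Str.isIn (PySem.Str.lower s) (PySem.Str.lower e))).foldl
        (fun st r => PySem.Set.discard st r) (pvSetOf d)) := rfl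
  rw [e0, pvFoldl_discard]
  have eREM : (pvSetOf d).filter
      (fun e => decide (e ∉ (pvSetOf d).filter
        (fun e => PySem.Str.isIn (PySem.Str.lower s) (PySem.Str.lower e))))
      = (d.items.filter
          (fun q => pvMin d.keys q.1 && !PySem.Str.isIn (PySem.Str.lower s) q.1)).map
        (fun q => q.2) := by
    have s1 : (pvSetOf d).filter
        (fun e => decide (e ∉ (pvSetOf d).filter
          (fun e => PySem.Str.isIn (PySem.Str.lower s) (PySem.Str.lower e))))
        = (pvSetOf d).filter
          (fun e => !PySem.Str.isIn (PySem.Str.lower s) (PySem.Str.lower e)) := by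
      apply List.filter_congr
      intro x hx
      by_cases hin : PySem.Str.isIn (PySem.Str.lower s) (PySem.Str.lower x) = true <;>
        simp [List.mem_filter, hx, hin]
    rw [s1]
    unfold pvSetOf
    rw [List.filter_map, List.filter_filter]
    congr 1
    apply List.filter_congr
    intro q hq
    show (!PySem.Str.isIn (PySem.Str.lower s) (PySem.Str.lower q.2) && pvMin d.keys q.1)
        = (pvMin d.keys q.1 && !PySem.Str.isIn (PySem.Str.lower s) q.1)
    rw [← hlow q hq, Bool.and_comm]
  rw [eREM]
  have hsnot : s ∉ (d.items.filter
      (fun q => pvMin d.keys q.1 && !PySem.Str.isIn (PySem.Str.lower s) q.1)).map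
      (fun q => q.2) := by
    intro hs
    obtain ⟨q, hq, hq2⟩ := List.mem_map.mp hs
    have h1 := List.mem_filter.mp hq
    have h2 := hlow q h1.1
    rw [hq2] at h2
    have h3 := h1.2
    rw [h2, pvIsIn_refl] at h3
    simp at h3
  have hiff : ((d.items.filter
        (fun q => pvMin d.keys q.1 && !PySem.Str.isIn (PySem.Str.lower s) q.1)).any
        (fun q => PySem.Str.isIn q.1 (PySem.Str.lower s)) = true)
      ↔ ¬ (pvMin (d.keys.filter (fun u => !(u == PySem.Str.lower s)) ++ [PySem.Str.lower s])
            (PySem.Str.lower s) = true) := by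
    rw [pvMin_append_k]
    constructor
    · intro hany hall
      obtain ⟨q, hq, hin⟩ := List.any_eq_true.mp hany
      have hqi := List.mem_filter.mp hq
      have hQ := hqi.2
      rw [Bool.and_eq_true] at hQ
      have hne : q.1 ≠ PySem.Str.lower s := by
        intro hh
        rw [hh, pvIsIn_refl] at hQ
        simp at hQ
      have hK : q.1 ∈ d.keys := List.mem_map_of_mem hqi.1
      rw [hall q.1 hK hne] at hin
      cases hin
    · intro hno
      push Not at hno
      obtain ⟨u, hu, hune, huin⟩ := hno
      obtain ⟨w, hw, hwk, hwne, hwmin⟩ :=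
        pvExists_min d.keys (PySem.Str.lower s) u.toList.length u le_rfl hu
          (by simpa using huin) hune
      obtain ⟨q, hq, hq1⟩ := List.mem_map.mp hw
      apply List.any_eq_true.mpr
      refine ⟨q, List.mem_filter.mpr ⟨hq, ?_⟩, by rw [hq1]; exact hwk⟩
      rw [hq1, Bool.and_eq_true]
      constructor
      · unfold pvMin
        apply List.all_eq_true.mpr
        intro u2 hu2
        by_cases h2 : u2 = w
        · simp [h2]
        · rw [Bool.or_eq_true]
          right
          rw [Bool.not_eq_eq_eq_not, Bool.not_true]
          exact hwmin u2 hu2 h2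
      · cases hkw : PySem.Str.isIn (PySem.Str.lower s) w with
        | false => rfl
        | true => exact absurd (pvIsIn_antisymm hwk hkw) hwne
  have hsa : ((d.items.filter
        (fun q => pvMin d.keys q.1 && !PySem.Str.isIn (PySem.Str.lower s) q.1)).map
        (fun q => q.2)).any
        (fun e => PySem.Str.isIn (PySem.Str.lower e) (PySem.Str.lower s))
      = !pvMin (d.keys.filter (fun u => !(u == PySem.Str.lower s)) ++ [PySem.Str.lower s])
          (PySem.Str.lower s) := by
    rw [List.any_map]
    have hcg : (d.items.filter
          (fun q => pvMin d.keys q.1 && !PySem.Str.isIn (PySem.Str.lower s) q.1)).any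
          ((fun e => PySem.Str.isIn (PySem.Str.lower e) (PySem.Str.lower s)) ∘ (fun q => q.2))
        = (d.items.filter
          (fun q => pvMin d.keys q.1 && !PySem.Str.isIn (PySem.Str.lower s) q.1)).any
          (fun q => PySem.Str.isIn q.1 (PySem.Str.lower s)) := by
      apply PySem.List.any_congr_mem
      intro q hq
      show PySem.Str.isIn (PySem.Str.lower q.2) (PySem.Str.lower s) = _
      rw [← hlow q (List.mem_of_mem_filter hq)]
    rw [hcg]
    cases hA : (d.items.filter
        (fun q => pvMin d.keys q.1 && !PySem.Str.isIn (PySem.Str.lower s) q.1)).any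
        (fun q => PySem.Str.isIn q.1 (PySem.Str.lower s)) with
    | false =>
      cases hB : pvMin (d.keys.filter (fun u => !(u == PySem.Str.lower s))
          ++ [PySem.Str.lower s]) (PySem.Str.lower s) with
      | true => rfl
      | false => exact absurd (hiff.mpr (by rw [hB]; simp)) (by rw [hA]; simp)
    | true =>
      cases hB : pvMin (d.keys.filter (fun u => !(u == PySem.Str.lower s))
          ++ [PySem.Str.lower s]) (PySem.Str.lower s) with
      | false => rfl
      | true => exact absurd hB (hiff.mp hA)
  beta_reduce
  rw [hsa, Bool.not_not]
  unfold pvSetOf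
  rw [pvItems_step, pvKeys_step, List.filter_append, List.map_append]
  have hfin : (d.items.filter
      (fun q => pvMin d.keys q.1 && !PySem.Str.isIn (PySem.Str.lower s) q.1)).map (fun q => q.2)
      = ((d.items.filter (fun p => !(p.1 == PySem.Str.lower s))).filter
          (fun p => pvMin (d.keys.filter (fun u => !(u == PySem.Str.lower s))
            ++ [PySem.Str.lower s]) p.1)).map (fun p => p.2) := by
    rw [List.filter_filter]
    congr 1
    apply List.filter_congr
    intro q _
    rw [pvMin_shift d.keys (PySem.Str.lower s) q.1, Bool.and_comm]
  rw [hfin]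
  cases hB : pvMin (d.keys.filter (fun u => !(u == PySem.Str.lower s))
      ++ [PySem.Str.lower s]) (PySem.Str.lower s) with
  | false =>
    rw [if_neg (by simp)]
    rw [show ([(PySem.Str.lower s, s)].filter
        (fun p => pvMin (d.keys.filter (fun u => !(u == PySem.Str.lower s))
          ++ [PySem.Str.lower s]) p.1)) = [] from by simp [List.filter, hB]]
    simp
  | true =>
    rw [if_pos rfl]
    rw [PySem.Set.add_of_not_mem (by rw [hfin] at hsnot; exact hsnot)]
    rw [show ([(PySem.Str.lower s, s)].filter
        (fun p => pvMin (d.keys.filter (fun u => !(u == PySem.Str.lower s))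
          ++ [PySem.Str.lower s]) p.1)) = [(PySem.Str.lower s, s)] from by simp [List.filter, hB]]
    simp

lemma pvMain (p : List String) :
    p.foldl (fun result_set string => pvUpdateStringSet result_set string) PySem.Set.empty =
      pvSetOf (p.foldl pvStep PySem.Dict.empty) ∧ pvInv (p.foldl pvStep PySem.Dict.empty) := by
  induction p using List.reverseRecOn with
  | nil => exact ⟨rfl, pvInv_empty⟩
  | append_singleton p s ih =>
    rw [List.foldl_append, List.foldl_append]
    simp only [List.foldl_cons, List.foldl_nil]
    exact ⟨by rw [ih.1]; exact pvStep_lemma _ _ ih.2, pvInv_step _ _ ih.2⟩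

lemma pvAlt_eq (p : List String) (h : pvInv (p.foldl pvStep PySem.Dict.empty)) :
    construct_non_containing_set_alt p = pvSetOf (p.foldl pvStep PySem.Dict.empty) := by
  have e1 : construct_non_containing_set_alt p =
      (p.foldl pvStep PySem.Dict.empty).items.foldl (fun acc q =>
        if (PySem.Set.ofList
            ((PySem.List.sorted (p.foldl pvStep PySem.Dict.empty).keys
                (fun k => PySem.Str.len k)).foldl
              (fun m k => if m.any (fun u => PySem.Str.isIn u k) then m else m ++ [k]) [])).contains
            q.1
        then PySem.Set.add acc q.2 else acc) PySem.Set.empty := rfl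
  rw [e1]
  generalize (p.foldl pvStep PySem.Dict.empty) = d at h ⊢
  have hc : ∀ q ∈ d.items,
      (PySem.Set.ofList
        ((PySem.List.sorted d.keys (fun k => PySem.Str.len k)).foldl
          (fun m k => if m.any (fun u => PySem.Str.isIn u k) then m else m ++ [k]) [])).contains q.1
      = pvMin d.keys q.1 := by
    intro q hq
    refine Bool.eq_iff_iff.mpr ?_
    rw [PySem.Set.contains_iff, PySem.Set.mem_ofList, pvMinimal_mem d.keys h.1 q.1, pvMin_iff]
    have hqk : q.1 ∈ d.keys := List.mem_map_of_mem hq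
    exact ⟨fun hh => hh.2, fun hh => ⟨hqk, hh⟩⟩
  have e2 : d.items.foldl (fun acc q =>
        if (PySem.Set.ofList
            ((PySem.List.sorted d.keys (fun k => PySem.Str.len k)).foldl
              (fun m k => if m.any (fun u => PySem.Str.isIn u k) then m else m ++ [k]) [])).contains
            q.1
        then PySem.Set.add acc q.2 else acc) PySem.Set.empty
      = d.items.foldl (fun acc q =>
        if pvMin d.keys q.1 then PySem.Set.add acc q.2 else acc) PySem.Set.empty := by
    apply PySem.List.foldl_congr_mem
    intro acc q hq
    rw [hc q hq]
  rw [e2, PySem.List.foldl_if_eq_foldl_filter]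
  rw [show (fun (acc : PySem.Set String) (q : String × String) => PySem.Set.add acc q.2)
      = (fun acc q => PySem.Set.add acc ((fun (r : String × String) => r.2) q)) from rfl]
  rw [← PySem.Set.update_map_eq_foldl_add,
    show (PySem.Set.empty : PySem.Set String) = [] from rfl, PySem.Set.update_nil_left]
  rw [PySem.Set.ofList_eq_self_of_nodup _ (pvVals_nodup d h _)]
  rfl

-- ===== VERDICT (by name: the statement is the Claim_ definition above) =====
theorem construct_non_containing_set_spec : Claim_equal_construct_non_containing_set := by
  intro strings _
  unfold Spec_construct_non_containing_set
  rw [pvAlt_eq strings (pvMain strings).2]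
  exact (pvMain strings).1
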